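-- pv_equiv track=rewrite | github.com/Kaminum42/LazyLex | lazylex/reg_to_words.py | split_by_escape
-- ===== SOURCE A (Python) =====
-- def split_by_escape(expr: str) -> list[str]:
--     # 将字符串切割成单个字符，但转义字符和其后的字符将会连接在一起。
--     ret = []
--     escaping = False
--     for ch in expr:
--         if escaping:
--             ret.append("\\" + ch)
--             escaping = False
--         elif ch != "\\":
--             ret.append(ch)
--         else:
--             escaping = True
--     if escaping:
--         raise ValueError("意外结束的转义字符。")
--     return ret
-- ===== SOURCE B (Python) =====
-- def split_by_escape(expr: str) -> list[str]:
--     # Index-based while loop with two-character lookahead instead of a boolean state flag.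
--     ret = []
--     i = 0
--     n = len(expr)
--     while i < n:
--         if expr[i] == "\\":
--             if i + 1 >= n:
--                 raise ValueError("意外结束的转义字符。")
--             ret.append(expr[i:i+2])
--             i += 2
--         else:
--             ret.append(expr[i])
--             i += 1
--     return ret
-- ===== Notes on version B (the rewrite author's own statement) =====
-- stated objective: idiomatic
-- what changed: Replaces the boolean escaping-state machine with an index-based while loop that consumes two characters at once on a backslash (lookahead instead of carried state).
import Mathlib
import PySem

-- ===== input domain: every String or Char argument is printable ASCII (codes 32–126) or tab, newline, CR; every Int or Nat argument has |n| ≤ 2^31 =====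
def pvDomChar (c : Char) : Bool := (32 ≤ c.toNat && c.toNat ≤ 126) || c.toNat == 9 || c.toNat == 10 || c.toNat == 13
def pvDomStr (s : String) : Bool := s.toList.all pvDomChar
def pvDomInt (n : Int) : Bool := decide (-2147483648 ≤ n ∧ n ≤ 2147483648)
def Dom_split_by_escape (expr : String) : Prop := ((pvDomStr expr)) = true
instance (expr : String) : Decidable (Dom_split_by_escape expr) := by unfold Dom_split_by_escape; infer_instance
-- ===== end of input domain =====

-- B replaces A's boolean escaping-state loop with two-character lookahead; same tokens, same raising inputs (excluded by Pre_).

-- ===== PORT A =====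
-- one step of A's for-loop: state = (ret, escaping)
def aStep (p : List String × Bool) (ch : Char) : List String × Bool :=
  if p.2 then (p.1 ++ [String.ofList ['\\', ch]], false)
  else if ch ≠ '\\' then (p.1 ++ [String.ofList [ch]], false)
  else (p.1, true)

def split_by_escape (expr : String) : List String :=
  (expr.toList.foldl aStep ([], false)).1

-- ===== PORT B =====
-- B's while loop over the remaining characters, consuming two on a backslash
def altGo : List Char → List String
  | [] => []
  | '\\' :: [] => []   -- Python raises here; excluded by Pre_
  | '\\' :: d :: rest => String.ofList ['\\', d] :: altGo rest
  | c :: rest => String.ofList [c] :: altGo rest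

def split_by_escape_alt (expr : String) : List String := altGo expr.toList

-- ===== PRECONDITION & SPEC =====
-- Pre_ excludes exactly the strings ending in an odd run of backslashes, on which both Pythons raise ValueError.
def Pre_split_by_escape (expr : String) : Prop :=
  (expr.toList.reverse.takeWhile (· == '\\')).length % 2 = 0
instance (expr : String) : Decidable (Pre_split_by_escape expr) := by
  unfold Pre_split_by_escape; infer_instance
def pvWitness_split_by_escape : String := "a\\nb"
def Spec_split_by_escape (expr : String) (out : List String) : Prop := out = split_by_escape_alt expr
instance (expr : String) (out : List String) : Decidable (Spec_split_by_escape expr out) := by unfold Spec_split_by_escape; infer_instance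

-- ===== CLAIM (what is proved, stated in full; the proofs are below) =====
def Claim_equal_split_by_escape : Prop := ∀ (expr : String), Dom_split_by_escape expr → Pre_split_by_escape expr → Spec_split_by_escape expr (split_by_escape expr)

-- ===== LEMMAS AND PROOFS =====
-- the fold's ret component equals acc ++ altGo l (regardless of parity: a final lone backslash adds nothing on either side)
theorem foldA_eq (l : List Char) (acc : List String) :
    (l.foldl aStep (acc, false)).1 = acc ++ altGo l := by
  induction l using altGo.induct generalizing acc with
  | case1 => simp [altGo]
  | case2 => simp [altGo, aStep]
  | case3 d rest ih => simp [altGo, aStep, ih]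
  | case4 c rest h ih ih1 =>
      have hc : c ≠ '\\' := by
        intro e
        cases rest with
        | nil => exact h e rfl
        | cons d r => exact ih d r e rfl
      simp [altGo, aStep, hc, ih1]

-- ===== VERDICT (by name: the statement is the Claim_ definition above) =====
theorem split_by_escape_spec : Claim_equal_split_by_escape := by
  intro expr _ _
  unfold Spec_split_by_escape split_by_escape split_by_escape_alt
  simpa using foldA_eq expr.toList []
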